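-- pv_equiv track=rewrite | github.com/QI1002/exampool | Leetcode/446.py | allSlices2
-- ===== SOURCE A (Python) =====
-- def allSlices2(data):
--
--     if (len(data) <= 2):
--         return []
--
--     c = data[-1]
--     t = allSlices2(data[:-1])
--     tt = [ list(x) for x in t ]
--     for x in t:
--         if ((c-x[-1]) == (x[1]-x[0])):
--             xx = list(x)
--             xx.append(c)
--             if (not xx in tt): tt.append(xx)
--
--     for j in range(len(data)-1,-1,-1):
--         cc = 2*data[j] - c
--         if (cc in data[:j]):
--             yy = [cc, data[j], c]
--             if (not yy in tt): tt.append(yy)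
--
--     return sorted(tt)
-- ===== SOURCE B (Python) =====
-- def allSlices2(data):
--     res = []
--     for end in range(2, len(data)):
--         c = data[end]
--         ext = [x + [c] for x in res if c - x[-1] == x[1] - x[0]]
--         tri = [[2 * data[j] - c, data[j], c]
--                for j in range(end + 1) if (2 * data[j] - c) in data[:j]]
--         pool = [list(y) for y in dict.fromkeys(tuple(y) for y in res + ext + tri)]
--         res = sorted(pool)
--     return res
-- ===== Notes on version B (the rewrite author's own statement) =====
-- stated objective: simpler
-- what changed: Replaces A's self-recursion on data[:-1] with two membership-guarded append loops by an iterative pass over prefix ends that builds the candidate extensions and triples as plain comprehensions (triples scanned upward), dedupes the combined pool once with dict.fromkeys, and sorts; correctness rests on the fact that sorting a duplicate-free pool makes the per-prefix result independent of enumeration order.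
import Mathlib
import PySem

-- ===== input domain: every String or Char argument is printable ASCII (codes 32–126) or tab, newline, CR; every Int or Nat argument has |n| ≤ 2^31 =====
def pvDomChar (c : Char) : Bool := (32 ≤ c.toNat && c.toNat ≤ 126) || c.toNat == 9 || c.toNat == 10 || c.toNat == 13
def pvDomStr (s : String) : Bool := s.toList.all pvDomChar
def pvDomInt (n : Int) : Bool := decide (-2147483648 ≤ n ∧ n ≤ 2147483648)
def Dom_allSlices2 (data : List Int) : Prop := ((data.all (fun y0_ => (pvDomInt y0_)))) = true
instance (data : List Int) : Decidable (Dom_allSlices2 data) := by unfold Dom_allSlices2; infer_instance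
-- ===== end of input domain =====

-- B replaces A's self-recursion with membership-guarded appends by an iterative pass
-- over prefix ends that builds the candidate lists by comprehensions (extensions and
-- triples, the triples scanned upward) and dedupes once per prefix (objective: simpler).

-- ===== PORT A =====
-- literal transliteration of A; data[-1]/x[1]/x[0]/x[-1] are in range wherever
-- Python does not raise (len(data) > 2 is guarded; elements of t have length ≥ 3),
-- so pyGetD's default 0 is never read.
def allSlices2 (data : List Int) : List (List Int) :=
  if _h : data.length ≤ 2 then []
  else
    let c := PySem.List.pyGetD data (-1) 0
    let t := allSlices2 (PySem.List.slice data none (some (-1)))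
    let tt := t.map (fun x => x)          -- [ list(x) for x in t ]
    let tt := t.foldl (fun acc x =>
        if c - PySem.List.pyGetD x (-1) 0 = PySem.List.pyGetD x 1 0 - PySem.List.pyGetD x 0 0 then
          -- xx = list(x); xx.append(c)  → x ++ [c]
          if x ++ [c] ∈ acc then acc else acc ++ [x ++ [c]]
        else acc) tt
    let tt := (PySem.List.pyRange ((data.length : Int) - 1) (-1) (-1)).foldl (fun acc j =>
        -- cc = 2*data[j] - c; yy = [cc, data[j], c]
        if 2 * PySem.List.pyGetD data j 0 - c ∈ PySem.List.slice data none (some j) then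
          if [2 * PySem.List.pyGetD data j 0 - c, PySem.List.pyGetD data j 0, c] ∈ acc then acc
          else acc ++ [[2 * PySem.List.pyGetD data j 0 - c, PySem.List.pyGetD data j 0, c]]
        else acc) tt
    PySem.List.sorted tt (fun x => x)
termination_by data.length
decreasing_by
  simp only [PySem.List.slice_to_neg_one, List.length_dropLast]
  omega

-- ===== PORT B =====
-- the body of B's outer 'for end in range(2, len(data))' loop
def allSlices2Step (data : List Int) (res : List (List Int)) (e : Int) : List (List Int) :=
  let c := PySem.List.pyGetD data e 0
  -- ext = [x + [c] for x in res if c - x[-1] == x[1] - x[0]]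
  let ext := res.filterMap (fun x =>
      if c - PySem.List.pyGetD x (-1) 0 = PySem.List.pyGetD x 1 0 - PySem.List.pyGetD x 0 0 then
        some (x ++ [c])
      else none)
  -- tri = [[2*data[j]-c, data[j], c] for j in range(end+1) if (2*data[j]-c) in data[:j]]
  let tri := (PySem.List.pyRange 0 (e + 1) 1).filterMap (fun j =>
      if 2 * PySem.List.pyGetD data j 0 - c ∈ PySem.List.slice data none (some j) then
        some [2 * PySem.List.pyGetD data j 0 - c, PySem.List.pyGetD data j 0, c]
      else none)
  -- pool = [list(y) for y in dict.fromkeys(tuple(y) for y in res + ext + tri)]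
  let pool := PySem.List.dedup (res ++ ext ++ tri)
  PySem.List.sorted pool (fun x => x)    -- res = sorted(pool)

def allSlices2_alt (data : List Int) : List (List Int) :=
  (PySem.List.pyRange 2 (data.length : Int) 1).foldl (allSlices2Step data) []

-- ===== PRECONDITION & SPEC =====
def Spec_allSlices2 (data : List Int) (out : List (List Int)) : Prop := out = allSlices2_alt data
instance (data : List Int) (out : List (List Int)) : Decidable (Spec_allSlices2 data out) := by unfold Spec_allSlices2; infer_instance

-- ===== CLAIM (what is proved, stated in full; the proofs are below) =====
def Claim_equal_allSlices2 : Prop := ∀ (data : List Int), Dom_allSlices2 data → Spec_allSlices2 data (allSlices2 data)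

-- ===== LEMMAS AND PROOFS =====

-- A-shaped prefix step (proof-side only): A's loop bodies on the full array, at prefix end e
def stepA (data : List Int) (res : List (List Int)) (e : Int) : List (List Int) :=
  let c := PySem.List.pyGetD data e 0
  let tt := res.map (fun x => x)
  let tt := res.foldl (fun acc x =>
      if c - PySem.List.pyGetD x (-1) 0 = PySem.List.pyGetD x 1 0 - PySem.List.pyGetD x 0 0 then
        if x ++ [c] ∈ acc then acc else acc ++ [x ++ [c]]
      else acc) tt
  let tt := (PySem.List.pyRange e (-1) (-1)).foldl (fun acc j =>
      if 2 * PySem.List.pyGetD data j 0 - c ∈ PySem.List.slice data none (some j) then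
        if [2 * PySem.List.pyGetD data j 0 - c, PySem.List.pyGetD data j 0, c] ∈ acc then acc
        else acc ++ [[2 * PySem.List.pyGetD data j 0 - c, PySem.List.pyGetD data j 0, c]]
      else acc) tt
  PySem.List.sorted tt (fun x => x)

theorem mem_foldl_addIf {α β : Type} [BEq β] [LawfulBEq β] (p : α → Prop) [DecidablePred p]
    (g : α → β) (l : List α) (acc : List β) (y : β) :
    y ∈ l.foldl (fun a x => if p x then (if g x ∈ a then a else a ++ [g x]) else a) acc
      ↔ y ∈ acc ∨ ∃ x ∈ l, p x ∧ y = g x := by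
  induction l generalizing acc with
  | nil => simp
  | cons hd tl ih =>
      simp only [List.foldl_cons, ih, List.mem_cons]
      by_cases hp : p hd
      · by_cases hm : g hd ∈ acc
        · simp only [if_pos hp, if_pos hm]
          constructor
          · rintro (h | ⟨x, hx, hpx, hy⟩)
            · exact Or.inl h
            · exact Or.inr ⟨x, Or.inr hx, hpx, hy⟩
          · rintro (h | ⟨x, rfl | hx, hpx, hy⟩)
            · exact Or.inl h
            · exact Or.inl (hy ▸ hm)
            · exact Or.inr ⟨x, hx, hpx, hy⟩
        · simp only [if_pos hp, if_neg hm, List.mem_append, List.mem_singleton]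
          constructor
          · rintro ((h | h) | ⟨x, hx, hpx, hy⟩)
            · exact Or.inl h
            · exact Or.inr ⟨hd, Or.inl rfl, hp, h⟩
            · exact Or.inr ⟨x, Or.inr hx, hpx, hy⟩
          · rintro (h | ⟨x, rfl | hx, hpx, hy⟩)
            · exact Or.inl (Or.inl h)
            · exact Or.inl (Or.inr hy)
            · exact Or.inr ⟨x, hx, hpx, hy⟩
      · simp only [if_neg hp]
        constructor
        · rintro (h | ⟨x, hx, hpx, hy⟩)
          · exact Or.inl h
          · exact Or.inr ⟨x, Or.inr hx, hpx, hy⟩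
        · rintro (h | ⟨x, rfl | hx, hpx, hy⟩)
          · exact Or.inl h
          · exact absurd hpx hp
          · exact Or.inr ⟨x, hx, hpx, hy⟩

theorem nodup_foldl_addIf {α β : Type} [BEq β] [LawfulBEq β] (p : α → Prop) [DecidablePred p]
    (g : α → β) (l : List α) (acc : List β) (h : acc.Nodup) :
    (l.foldl (fun a x => if p x then (if g x ∈ a then a else a ++ [g x]) else a) acc).Nodup := by
  induction l generalizing acc with
  | nil => exact h
  | cons hd tl ih =>
      simp only [List.foldl_cons]
      apply ih
      by_cases hp : p hd
      · by_cases hm : g hd ∈ acc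
        · simpa [hp, hm] using h
        · simp only [if_pos hp, if_neg hm]
          exact List.Nodup.append h (List.nodup_singleton _) (by simpa using hm)
      · simpa [hp] using h

theorem stepA_eq_stepB (data : List Int) (res : List (List Int)) (e : Int)
    (h : res.Nodup) : stepA data res e = allSlices2Step data res e := by
  unfold stepA allSlices2Step
  simp only [List.map_id']
  apply (fun hperm => by convert (PySem.List.sorted_id_eq_sorted_id_iff_perm _ _).mpr hperm using 2 :
    _root_.List.Perm _ _ → _)
  refine (List.perm_ext_iff_of_nodup ?_ (PySem.List.nodup_dedup _)).mpr ?_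
  · exact nodup_foldl_addIf
      (p := fun j => 2 * PySem.List.pyGetD data j 0 - PySem.List.pyGetD data e 0 ∈ PySem.List.slice data none (some j))
      (g := fun j => [2 * PySem.List.pyGetD data j 0 - PySem.List.pyGetD data e 0, PySem.List.pyGetD data j 0, PySem.List.pyGetD data e 0])
      _ _
      (nodup_foldl_addIf
        (p := fun x => PySem.List.pyGetD data e 0 - PySem.List.pyGetD x (-1) 0 = PySem.List.pyGetD x 1 0 - PySem.List.pyGetD x 0 0)
        (g := fun x => x ++ [PySem.List.pyGetD data e 0]) res res h)
  · intro y
    have h1 := mem_foldl_addIf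
      (p := fun j => 2 * PySem.List.pyGetD data j 0 - PySem.List.pyGetD data e 0 ∈ PySem.List.slice data none (some j))
      (g := fun j => [2 * PySem.List.pyGetD data j 0 - PySem.List.pyGetD data e 0, PySem.List.pyGetD data j 0, PySem.List.pyGetD data e 0])
      (PySem.List.pyRange e (-1) (-1))
      (res.foldl (fun acc x =>
        if PySem.List.pyGetD data e 0 - PySem.List.pyGetD x (-1) 0 = PySem.List.pyGetD x 1 0 - PySem.List.pyGetD x 0 0 then
          if x ++ [PySem.List.pyGetD data e 0] ∈ acc then acc else acc ++ [x ++ [PySem.List.pyGetD data e 0]]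
        else acc) res) y
    have h2 := mem_foldl_addIf
      (p := fun x => PySem.List.pyGetD data e 0 - PySem.List.pyGetD x (-1) 0 = PySem.List.pyGetD x 1 0 - PySem.List.pyGetD x 0 0)
      (g := fun x => x ++ [PySem.List.pyGetD data e 0]) res res y
    have h3 : ((y ∈ res ∨ ∃ x ∈ res,
          (PySem.List.pyGetD data e 0 - PySem.List.pyGetD x (-1) 0 = PySem.List.pyGetD x 1 0 - PySem.List.pyGetD x 0 0)
            ∧ y = x ++ [PySem.List.pyGetD data e 0]) ∨
        ∃ j ∈ PySem.List.pyRange e (-1) (-1),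
          (2 * PySem.List.pyGetD data j 0 - PySem.List.pyGetD data e 0 ∈ PySem.List.slice data none (some j))
            ∧ y = [2 * PySem.List.pyGetD data j 0 - PySem.List.pyGetD data e 0, PySem.List.pyGetD data j 0, PySem.List.pyGetD data e 0]) ↔
        y ∈ PySem.List.dedup (res ++
          res.filterMap (fun x =>
            if PySem.List.pyGetD data e 0 - PySem.List.pyGetD x (-1) 0 = PySem.List.pyGetD x 1 0 - PySem.List.pyGetD x 0 0 then
              some (x ++ [PySem.List.pyGetD data e 0]) else none) ++
          (PySem.List.pyRange 0 (e + 1) 1).filterMap (fun j =>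
            if 2 * PySem.List.pyGetD data j 0 - PySem.List.pyGetD data e 0 ∈ PySem.List.slice data none (some j) then
              some [2 * PySem.List.pyGetD data j 0 - PySem.List.pyGetD data e 0, PySem.List.pyGetD data j 0, PySem.List.pyGetD data e 0]
            else none)) := by
      simp only [PySem.List.mem_dedup, List.mem_append, List.mem_filterMap,
        PySem.List.mem_pyRange_neg_one, PySem.List.mem_pyRange_one]
      constructor
      · rintro ((hy | ⟨x, hx, hpx, hy⟩) | ⟨j, hj, hpj, hy⟩)
        · exact Or.inl (Or.inl hy)
        · exact Or.inl (Or.inr ⟨x, hx, by rw [if_pos hpx, hy]⟩)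
        · exact Or.inr ⟨j, ⟨by omega, by omega⟩, by rw [if_pos hpj, hy]⟩
      · rintro ((hy | ⟨x, hx, hfx⟩) | ⟨j, hj, hfj⟩)
        · exact Or.inl (Or.inl hy)
        · by_cases hpx : PySem.List.pyGetD data e 0 - PySem.List.pyGetD x (-1) 0 = PySem.List.pyGetD x 1 0 - PySem.List.pyGetD x 0 0
          · rw [if_pos hpx, Option.some.injEq] at hfx
            exact Or.inl (Or.inr ⟨x, hx, hpx, hfx.symm⟩)
          · rw [if_neg hpx] at hfx; exact absurd hfx (by simp)
        · by_cases hpj : 2 * PySem.List.pyGetD data j 0 - PySem.List.pyGetD data e 0 ∈ PySem.List.slice data none (some j)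
          · rw [if_pos hpj, Option.some.injEq] at hfj
            exact Or.inr ⟨j, ⟨by omega, by omega⟩, hpj, hfj.symm⟩
          · rw [if_neg hpj] at hfj; exact absurd hfj (by simp)
    exact (h1.trans (or_congr h2 Iff.rfl)).trans h3

theorem nodup_stepB (data : List Int) (res : List (List Int)) (e : Int) :
    (allSlices2Step data res e).Nodup := by
  unfold allSlices2Step
  exact ((PySem.List.sorted_perm _ _ _).nodup_iff).mpr (PySem.List.nodup_dedup _)

theorem foldl_stepA_eq_stepB (data : List Int) (l : List Int) (res : List (List Int))
    (h : res.Nodup) : l.foldl (stepA data) res = l.foldl (allSlices2Step data) res := by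
  induction l generalizing res with
  | nil => rfl
  | cons hd tl ih =>
      simp only [List.foldl_cons]
      rw [stepA_eq_stepB data res hd h]
      exact ih _ (nodup_stepB data res hd)

theorem mem_pyRange_countdown {k j : Int} (hj : j ∈ PySem.List.pyRange k (-1) (-1)) :
    0 ≤ j ∧ j ≤ k := by
  rw [PySem.List.mem_pyRange_neg_one] at hj
  omega

theorem allSlices2_take_succ (data : List Int) (k : Nat) (hk2 : 2 ≤ k) (hk : k + 1 ≤ data.length) :
    allSlices2 (data.take (k+1)) = stepA data (allSlices2 (data.take k)) (k : Int) := by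
  have hlen : (data.take (k+1)).length = k+1 := by simp; omega
  have hne : ¬ (data.take (k+1)).length ≤ 2 := by omega
  have hslice : PySem.List.slice (data.take (k+1)) none (some (-1)) = data.take k := by
    rw [PySem.List.slice_to_neg_one, List.dropLast_eq_take, hlen]
    simp [List.take_take]
  have hc : PySem.List.pyGetD (data.take (k+1)) (-1) 0 = PySem.List.pyGetD data (k : Int) 0 := by
    have hne' : data.take (k+1) ≠ [] := by
      intro h; rw [h] at hlen; simp at hlen
    rw [PySem.List.pyGetD_neg_one _ _ hne', List.getLast_take]
    simp [PySem.List.pyGetD_natCast, List.getD_eq_getElem?_getD,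
      List.getElem?_eq_getElem (show k < data.length by omega)]
  have hget : ∀ j : Int, 0 ≤ j → j ≤ (k : Int) →
      PySem.List.pyGetD (data.take (k+1)) j 0 = PySem.List.pyGetD data j 0 := by
    intro j h0 hjk
    obtain ⟨n, rfl⟩ := Int.eq_ofNat_of_zero_le h0
    have hn : n < k + 1 := by exact_mod_cast by omega
    simp [PySem.List.pyGetD_natCast, List.getD_eq_getElem?_getD, hn]
  have hsl : ∀ j : Int, 0 ≤ j → j ≤ (k : Int) →
      PySem.List.slice (data.take (k+1)) none (some j) = PySem.List.slice data none (some j) := by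
    intro j h0 hjk
    rw [PySem.List.slice_to _ h0, PySem.List.slice_to _ h0, List.take_take]
    congr 1
    omega
  rw [allSlices2, dif_neg hne]
  unfold stepA
  rw [hslice, hc, hlen]
  have hcast : ((k + 1 : Nat) : Int) - 1 = (k : Int) := by push_cast; ring
  rw [hcast]
  dsimp only
  congr 1
  apply PySem.List.foldl_congr_mem
  intro acc j hj
  obtain ⟨h0, hjk⟩ := mem_pyRange_countdown hj
  simp only [hget j h0 hjk, hsl j h0 hjk]

theorem allSlices2_take (data : List Int) (k : Nat) (hk : k ≤ data.length) :
    allSlices2 (data.take k) = (PySem.List.pyRange 2 (k : Int) 1).foldl (stepA data) [] := by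
  induction k with
  | zero =>
      rw [allSlices2]
      simp [PySem.List.pyRange_one_eq_nil]
  | succ m ih =>
      by_cases hm : m + 1 ≤ 2
      · rw [allSlices2]
        rw [PySem.List.pyRange_one_eq_nil (by push_cast; omega)]
        simp [List.length_take]
        omega
      · have h2 : 2 ≤ m := by omega
        rw [show ((m+1 : Nat) : Int) = (m : Int) + 1 by push_cast; ring,
            PySem.List.pyRange_one_succ_right (by exact_mod_cast by omega : (2:Int) ≤ (m:Int)),
            List.foldl_append]
        simp only [List.foldl_cons, List.foldl_nil]
        rw [← ih (by omega), allSlices2_take_succ data m h2 hk]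

-- ===== VERDICT (by name: the statement is the Claim_ definition above) =====
theorem allSlices2_spec : Claim_equal_allSlices2 := by
  intro data _
  unfold Spec_allSlices2 allSlices2_alt
  have h1 := allSlices2_take data data.length le_rfl
  rw [List.take_length] at h1
  rw [h1, foldl_stepA_eq_stepB data _ [] List.nodup_nil]
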